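-- pv_equiv track=rewrite | github.com/wssranjula/Otter-Transcripts | run_sybil_clean.py | clean_sybil_response
-- ===== SOURCE A (Python) =====
-- def clean_sybil_response(response):
--     """Clean up Sybil's response for better readability"""
--
--     # Remove database warnings and technical details
--     lines = response.split('\n')
--     clean_lines = []
--
--     skip_next = False
--     for line in lines:
--         # Skip database warnings and technical output
--         if any(phrase in line.lower() for phrase in [
--             'received notification from dbms',
--             'gqlstatusobject',
--             'warn: procedure or function',
--             'execution of the procedure',
--             'generated the warning',
--             'raw_classification',
--             'diagnostic_record',
--             'classification=',
--             'severity=',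
--             'position=',
--             'raw_severity',
--             'gql_status',
--             'status_description',
--             'notificationclassification',
--             'notificationseverity',
--             'summaryinputposition',
--             'call db.schema',
--             'yield nodetype',
--             'yield reltype',
--             'return nodelabels',
--             'return reltype',
--             'order by',
--             'for query:'
--         ]):
--             skip_next = True
--             continue
--
--         # Skip continuation lines after warnings
--         if skip_next and (line.strip().startswith("'") or line.strip().startswith('"') or line.strip() == ''):
--             continue
--         else:
--             skip_next = False
--
--         # Keep the line if it's not a warning
--         if not skip_next:
--             clean_lines.append(line)
--
--     # Join the clean lines
--     clean_response = '\n'.join(clean_lines).strip()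
--
--     # If response is too short or empty, provide a fallback
--     if len(clean_response) < 10:
--         return "I'm sorry, I couldn't process that request. Please try rephrasing your question."
--
--     return clean_response
-- ===== SOURCE B (Python) =====
-- _WARN_PHRASES = [
--     'received notification from dbms',
--     'gqlstatusobject',
--     'warn: procedure or function',
--     'execution of the procedure',
--     'generated the warning',
--     'raw_classification',
--     'diagnostic_record',
--     'classification=',
--     'severity=',
--     'position=',
--     'raw_severity',
--     'gql_status',
--     'status_description',
--     'notificationclassification',
--     'notificationseverity',
--     'summaryinputposition',
--     'call db.schema',
--     'yield nodetype',
--     'yield reltype',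
--     'return nodelabels',
--     'return reltype',
--     'order by',
--     'for query:'
-- ]
--
--
-- def _is_warning(line):
--     low = line.lower()
--     return any(p in low for p in _WARN_PHRASES)
--
--
-- def _is_continuation(line):
--     s = line.strip()
--     return s == '' or s.startswith("'") or s.startswith('"')
--
--
-- def clean_sybil_response(response):
--     """Clean up Sybil's response for better readability"""
--     lines = response.split('\n')
--     kept = []
--     i, n = 0, len(lines)
--     while i < n:
--         if _is_warning(lines[i]):
--             # skip the warning line, then consume its continuation lines
--             i += 1
--             while i < n and _is_continuation(lines[i]):
--                 i += 1
--         else: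
--             kept.append(lines[i])
--             i += 1
--     cleaned = '\n'.join(kept).strip()
--     if len(cleaned) < 10:
--         return "I'm sorry, I couldn't process that request. Please try rephrasing your question."
--     return cleaned
-- ===== Notes on version B (the rewrite author's own statement) =====
-- stated objective: alternative
-- what changed: Replaces A's forward-carried skip_next flag state machine with an index-free group-consuming scan: when a warning line is met it is skipped and the whole following run of continuation lines is consumed at once (dropWhile), so no boolean state crosses loop iterations.
import Mathlib
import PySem

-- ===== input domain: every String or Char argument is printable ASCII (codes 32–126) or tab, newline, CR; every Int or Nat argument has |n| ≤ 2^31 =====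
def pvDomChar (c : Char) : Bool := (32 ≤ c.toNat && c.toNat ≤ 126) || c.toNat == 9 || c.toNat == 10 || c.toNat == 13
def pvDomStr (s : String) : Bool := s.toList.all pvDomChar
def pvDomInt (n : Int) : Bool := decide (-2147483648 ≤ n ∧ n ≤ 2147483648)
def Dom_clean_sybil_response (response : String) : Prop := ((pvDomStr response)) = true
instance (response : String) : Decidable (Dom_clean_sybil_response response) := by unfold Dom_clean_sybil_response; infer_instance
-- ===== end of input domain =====

-- B replaces A's forward-carried skip_next flag by an explicit group-consuming scan
-- (skip a warning line, then drop its run of continuation lines at once); objective: alternative.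

-- module-level constant shared by both programs: the warning phrases
def warnPhrases : List String := [
  "received notification from dbms",
  "gqlstatusobject",
  "warn: procedure or function",
  "execution of the procedure",
  "generated the warning",
  "raw_classification",
  "diagnostic_record",
  "classification=",
  "severity=",
  "position=",
  "raw_severity",
  "gql_status",
  "status_description",
  "notificationclassification",
  "notificationseverity",
  "summaryinputposition",
  "call db.schema",
  "yield nodetype",
  "yield reltype",
  "return nodelabels",
  "return reltype",
  "order by",
  "for query:"]

def pvFallback : String := "I'm sorry, I couldn't process that request. Please try rephrasing your question."

-- ===== PORT A =====
-- one step of A's for-loop: state = (clean_lines, skip_next)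
def aStep (st : List String × Bool) (line : String) : List String × Bool :=
  if warnPhrases.any (fun p => PySem.Str.isIn p (PySem.Str.lower line)) then
    (st.1, true)
  else if st.2 && (PySem.Str.startswith (PySem.Str.strip line) "'"
        || PySem.Str.startswith (PySem.Str.strip line) "\""
        || PySem.Str.strip line == "") then
    (st.1, true)
  else
    -- skip_next was just set to False, so the 'if not skip_next' append always fires here
    (st.1 ++ [line], false)

def clean_sybil_response (response : String) : String :=
  let lines := (PySem.Str.split? response "\n").getD []
  let st := lines.foldl aStep ([], false)
  let clean_response := PySem.Str.strip (PySem.Str.join "\n" st.1)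
  if PySem.Str.len clean_response < 10 then pvFallback else clean_response

-- ===== PORT B =====
def bIsWarning (line : String) : Bool :=
  let low := PySem.Str.lower line
  warnPhrases.any (fun p => PySem.Str.isIn p low)

def bIsContinuation (line : String) : Bool :=
  let s := PySem.Str.strip line
  s == "" || PySem.Str.startswith s "'" || PySem.Str.startswith s "\""

-- B's outer while-loop as structural recursion; the inner consume-loop is dropWhile
def bScan : List String → List String
  | [] => []
  | l :: ls =>
      if bIsWarning l then bScan (ls.dropWhile bIsContinuation)
      else l :: bScan ls
termination_by ls => ls.length
decreasing_by
  · have := List.length_dropWhile_le bIsContinuation ls; simp; omega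
  · simp

def clean_sybil_response_alt (response : String) : String :=
  let kept := bScan ((PySem.Str.split? response "\n").getD [])
  let cleaned := PySem.Str.strip (PySem.Str.join "\n" kept)
  if PySem.Str.len cleaned < 10 then pvFallback else cleaned

-- ===== PRECONDITION & SPEC =====
def Spec_clean_sybil_response (response : String) (out : String) : Prop := out = clean_sybil_response_alt response
instance (response : String) (out : String) : Decidable (Spec_clean_sybil_response response out) := by unfold Spec_clean_sybil_response; infer_instance

-- ===== CLAIM (what is proved, stated in full; the proofs are below) =====
def Claim_equal_clean_sybil_response : Prop := ∀ (response : String), Dom_clean_sybil_response response → Spec_clean_sybil_response response (clean_sybil_response response)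

-- ===== LEMMAS AND PROOFS =====

lemma warn_expr (l : String) :
    (warnPhrases.any (fun p => PySem.Str.isIn p (PySem.Str.lower l))) = bIsWarning l := rfl

lemma cont_expr (l : String) :
    (PySem.Str.startswith (PySem.Str.strip l) "'"
      || PySem.Str.startswith (PySem.Str.strip l) "\""
      || PySem.Str.strip l == "") = bIsContinuation l := by
  unfold bIsContinuation
  cases h1 : (PySem.Str.strip l == "") <;>
  cases h2 : PySem.Str.startswith (PySem.Str.strip l) "'" <;>
  cases h3 : PySem.Str.startswith (PySem.Str.strip l) "\"" <;>
    simp_all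

-- A's step, re-expressed through B's two predicates
lemma aStep_eq (acc : List String) (sk : Bool) (l : String) :
    aStep (acc, sk) l
      = if bIsWarning l then (acc, true)
        else if sk && bIsContinuation l then (acc, true)
        else (acc ++ [l], false) := by
  simp only [aStep, warn_expr, cont_expr]

-- A's loop invariant: with skip_next set, the rest behaves like B after dropping continuations
lemma foldl_aStep_eq (ls : List String) (acc : List String) (skip : Bool) :
    (ls.foldl aStep (acc, skip)).1
      = acc ++ (if skip then bScan (ls.dropWhile bIsContinuation) else bScan ls) := by
  induction ls generalizing acc skip with
  | nil => cases skip <;> simp [bScan]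
  | cons l ls ih =>
      rw [List.foldl_cons, aStep_eq]
      cases hw : bIsWarning l <;> cases hc : bIsContinuation l <;> cases skip <;>
        simp [ih, bScan, hw, hc]

-- ===== VERDICT (by name: the statement is the Claim_ definition above) =====
theorem clean_sybil_response_spec : Claim_equal_clean_sybil_response := by
  intro response _
  unfold Spec_clean_sybil_response clean_sybil_response clean_sybil_response_alt
  simp only [foldl_aStep_eq, if_neg (Bool.false_ne_true), List.nil_append]
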